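-- pv_equiv track=rewrite | github.com/sburdges-eng/miDiKompanion | code/python/idaw_batch2_Desktop_iDAWComp_DAiW-Music-Brain copy_music_brain_audio_theory_analyzer.py | rotate_scale
-- ===== SOURCE A (Python) =====
-- from typing import List, Dict, Optional, Tuple, Set
--
-- def rotate_scale(intervals: List[int], steps: int) -> List[int]:
--     """Rotate scale intervals (for mode detection)."""
--     n = len(intervals)
--     if n == 0:
--         return intervals
--
--     # Normalize steps
--     steps = steps % n
--
--     # Rotate and normalize to start from 0
--     rotated = intervals[steps:] + [i + 12 for i in intervals[:steps]]
--     base = rotated[0]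
--     return [(i - base) % 12 for i in rotated]
-- ===== SOURCE B (Python) =====
-- def rotate_scale(intervals, steps):
--     """Rotate scale intervals (for mode detection)."""
--     n = len(intervals)
--     if n == 0:
--         return intervals
--     steps = steps % n
--     base = intervals[steps]
--     return [(intervals[(steps + j) % n] - base) % 12 for j in range(n)]
-- ===== Notes on version B (the rewrite author's own statement) =====
-- stated objective: simpler
-- what changed: B drops the slice-concatenate rotation and the +12 offset (irrelevant mod 12): it reads elements by modular index in one comprehension, never building the intermediate rotated list.
import Mathlib
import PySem

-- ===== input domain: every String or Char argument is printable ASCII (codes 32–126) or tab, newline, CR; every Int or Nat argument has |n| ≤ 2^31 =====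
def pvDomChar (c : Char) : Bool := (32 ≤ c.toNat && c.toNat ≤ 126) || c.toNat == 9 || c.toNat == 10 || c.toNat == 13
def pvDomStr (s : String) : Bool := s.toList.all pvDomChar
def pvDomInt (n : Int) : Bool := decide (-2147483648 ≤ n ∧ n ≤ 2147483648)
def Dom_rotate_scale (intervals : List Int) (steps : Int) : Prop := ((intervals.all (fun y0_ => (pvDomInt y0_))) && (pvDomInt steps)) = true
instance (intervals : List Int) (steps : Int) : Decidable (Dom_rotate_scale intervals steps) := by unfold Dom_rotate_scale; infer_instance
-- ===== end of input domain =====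

-- B replaces A's slice-concatenate rotation (with its +12 offset, irrelevant mod 12) by a single comprehension reading elements via modular indexing; objective: simpler.


-- ===== PORT A =====
def rotate_scale (intervals : List Int) (steps : Int) : List Int :=
  let n : Int := intervals.length
  if n = 0 then intervals
  else
    let steps' := PySem.Int.mod steps n
    let rotated := PySem.List.slice intervals (some steps') none ++
                   (PySem.List.slice intervals none (some steps')).map (fun i => i + 12)
    let base := PySem.List.pyGetD rotated 0 0
    rotated.map (fun i => PySem.Int.mod (i - base) 12)

-- ===== PORT B =====
def rotate_scale_alt (intervals : List Int) (steps : Int) : List Int :=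
  let n : Int := intervals.length
  if n = 0 then intervals
  else
    let steps' := PySem.Int.mod steps n
    let base := PySem.List.pyGetD intervals steps' 0
    (PySem.List.pyRange 0 n 1).map
      (fun j => PySem.Int.mod (PySem.List.pyGetD intervals (PySem.Int.mod (steps' + j) n) 0 - base) 12)

-- ===== PRECONDITION & SPEC =====
def Spec_rotate_scale (intervals : List Int) (steps : Int) (out : List Int) : Prop := out = rotate_scale_alt intervals steps
instance (intervals : List Int) (steps : Int) (out : List Int) : Decidable (Spec_rotate_scale intervals steps out) := by unfold Spec_rotate_scale; infer_instance

-- ===== CLAIM (what is proved, stated in full; the proofs are below) =====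
def Claim_equal_rotate_scale : Prop := ∀ (intervals : List Int) (steps : Int), Dom_rotate_scale intervals steps → Spec_rotate_scale intervals steps (rotate_scale intervals steps)

-- ===== LEMMAS AND PROOFS =====
theorem ports_eq (xs : List Int) (steps : Int) :
    rotate_scale xs steps = rotate_scale_alt xs steps := by
  unfold rotate_scale rotate_scale_alt
  by_cases h : (xs.length : Int) = 0
  · simp [h]
  · simp only [if_neg h]
    have hpos : (0:Int) < xs.length := by omega
    set s := PySem.Int.mod steps xs.length with hsdef
    have hs0 : 0 ≤ s := PySem.Int.mod_nonneg steps hpos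
    have hsl : s < xs.length := PySem.Int.mod_lt steps hpos
    rw [PySem.List.slice_from xs hs0, PySem.List.slice_to xs hs0]
    set st := s.toNat with hst
    have hstl : st < xs.length := by omega
    have hbase : PySem.List.pyGetD (xs.drop st ++ (xs.take st).map (fun i => i + 12)) 0 0
        = PySem.List.pyGetD xs s 0 := by
      rw [PySem.List.pyGetD_zero, PySem.List.pyGetD_eq_getElem xs 0 hs0 hsl]
      rw [List.getD_eq_getElem _ _ (by simp; omega)]
      rw [List.getElem_append_left (by simp; omega), List.getElem_drop]
      rfl
    rw [hbase]
    set base := PySem.List.pyGetD xs s 0 with hbdef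
    clear_value base
    apply List.ext_getElem
    · simp; omega
    · intro k hk1 hk2
      have hkN : k < xs.length := by simpa using hk2
      simp only [List.getElem_map, PySem.List.getElem_pyRange_one, zero_add]
      have h12 : PySem.Int.mod (s + (k:Int)) xs.length =
          (s + k) % (xs.length : Int) := PySem.Int.mod_eq_emod_of_pos hpos
      by_cases hcase : k < xs.length - st
      · have hv : PySem.List.pyGetD xs (PySem.Int.mod (s + (k:Int)) xs.length) 0
            = (xs.drop st ++ (xs.take st).map (fun i => i + 12))[k]'(by simp; omega) := by
          rw [h12, Int.emod_eq_of_lt (by omega) (by omega)]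
          rw [PySem.List.pyGetD_eq_getElem xs _ (by omega) (by omega)]
          rw [List.getElem_append_left (by simp; omega), List.getElem_drop]
          congr 1
          omega
        rw [hv]
      · have hemod : (s + (k:Int)) % (xs.length : Int) = s + k - xs.length := by
          rw [(Int.sub_emod_right (s + (k:Int)) (xs.length : Int)).symm]
          exact Int.emod_eq_of_lt (by omega) (by omega)
        have hv : PySem.List.pyGetD xs (PySem.Int.mod (s + (k:Int)) xs.length) 0
            = xs[k - (xs.length - st)]'(by omega) := by
          rw [h12, hemod]
          rw [PySem.List.pyGetD_eq_getElem xs _ (by omega) (by omega)]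
          congr 1
          omega
        rw [hv, List.getElem_append_right (by simp; omega)]
        simp only [List.getElem_map, List.getElem_take]
        have hidx : xs[(k - (xs.drop st).length)]'(by simp; omega)
            = xs[k - (xs.length - st)]'(by omega) := by
          congr 1
          simp
        rw [hidx]
        rw [PySem.Int.mod_eq_emod_of_pos (by norm_num : (0:Int) < 12),
            PySem.Int.mod_eq_emod_of_pos (by norm_num : (0:Int) < 12)]
        omega

-- ===== VERDICT (by name: the statement is the Claim_ definition above) =====
theorem rotate_scale_spec : Claim_equal_rotate_scale := by
  intro intervals steps _
  unfold Spec_rotate_scale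
  exact ports_eq intervals steps
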